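-- pv_equiv track=rewrite | github.com/noritakaIzumi/atcoder-python | abc144/b/main.py | is_in_mul_table
-- ===== SOURCE A (Python) =====
-- def is_in_mul_table(n: int) -> bool:
--     if n == 0:
--         return False
--
--     for i in range(1, 9 + 1):
--         q, mod = divmod(n, i)
--         if mod == 0 and 1 <= q <= 9:
--             return True
--
--     return False
-- ===== SOURCE B (Python) =====
-- _TABLE = frozenset(i * j for i in range(1, 10) for j in range(1, 10))
--
--
-- def is_in_mul_table(n: int) -> bool:
--     return n in _TABLE
-- ===== Notes on version B (the rewrite author's own statement) =====
-- stated objective: idiomatic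
-- what changed: Replaces the trial-division loop (divmod by each i in 1..9 and quotient range check) with a precomputed lookup table of all 9x9 products and a single membership test; the explicit zero guard disappears since every table entry is positive.
import Mathlib
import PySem

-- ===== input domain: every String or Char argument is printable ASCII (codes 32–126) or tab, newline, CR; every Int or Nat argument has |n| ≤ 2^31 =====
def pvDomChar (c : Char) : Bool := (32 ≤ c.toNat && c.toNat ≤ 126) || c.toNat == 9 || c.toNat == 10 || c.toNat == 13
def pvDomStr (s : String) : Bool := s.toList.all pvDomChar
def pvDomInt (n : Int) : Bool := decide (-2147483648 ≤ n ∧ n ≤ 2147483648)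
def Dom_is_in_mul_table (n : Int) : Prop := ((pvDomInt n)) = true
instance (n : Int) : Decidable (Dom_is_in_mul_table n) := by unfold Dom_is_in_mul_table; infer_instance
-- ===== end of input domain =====

-- B replaces A's trial-division loop by a precomputed table of the 81 products and one membership test (idiomatic, not claimed faster).

-- ===== PORT A =====
-- the for-loop with early return, as structural recursion over the range list
def pvLoopA (n : Int) : List Int → Bool
  | [] => false
  | i :: rest =>
    match PySem.Int.divmod? n i with
    | none => false  -- unreachable guard: every i here is ≥ 1 (Python would raise on i = 0)
    | some (q, m) => if m = 0 ∧ 1 ≤ q ∧ q ≤ 9 then true else pvLoopA n rest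

def is_in_mul_table (n : Int) : Bool :=
  if n = 0 then false
  else pvLoopA n (PySem.List.pyRange 1 10 1)

-- ===== PORT B =====
-- _TABLE = frozenset(i * j for i in range(1, 10) for j in range(1, 10))
def pvTableB : PySem.Set Int :=
  PySem.Set.ofList ((PySem.List.pyRange 1 10 1).flatMap
    (fun i => (PySem.List.pyRange 1 10 1).map (fun j => i * j)))

def is_in_mul_table_alt (n : Int) : Bool := PySem.Set.contains pvTableB n

-- ===== PRECONDITION & SPEC =====
def Spec_is_in_mul_table (n : Int) (out : Bool) : Prop := out = is_in_mul_table_alt n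
instance (n : Int) (out : Bool) : Decidable (Spec_is_in_mul_table n out) := by unfold Spec_is_in_mul_table; infer_instance

-- ===== CLAIM (what is proved, stated in full; the proofs are below) =====
def Claim_equal_is_in_mul_table : Prop := ∀ (n : Int), Dom_is_in_mul_table n → Spec_is_in_mul_table n (is_in_mul_table n)

-- ===== LEMMAS AND PROOFS =====

-- the loop condition never fires when n is outside [1, 81]
lemma pvCondA_false (n i : Int) (hi : 1 ≤ i) (hi9 : i ≤ 9) (h : n < 1 ∨ 81 < n) :
    ¬ (n.fmod i = 0 ∧ 1 ≤ n.fdiv i ∧ n.fdiv i ≤ 9) := by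
  rintro ⟨hm, hq1, hq9⟩
  have hdm := PySem.Int.floordiv_mul_add_mod n i
  simp only [PySem.Int.floordiv, PySem.Int.mod] at hdm
  rw [hm] at hdm
  set q := n.fdiv i with hq
  have hn : n = q * i := by omega
  rcases h with h | h <;> nlinarith

lemma pvLoopA_false (n : Int) (L : List Int) (hL : ∀ i ∈ L, 1 ≤ i ∧ i ≤ 9)
    (h : n < 1 ∨ 81 < n) : pvLoopA n L = false := by
  induction L with
  | nil => rfl
  | cons i rest ih =>
    obtain ⟨hi1, hi9⟩ := hL i (by simp)
    have hiz : i ≠ 0 := by omega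
    simp only [pvLoopA, PySem.Int.divmod?, hiz, if_false]
    rw [if_neg (pvCondA_false n i hi1 hi9 h)]
    exact ih (fun j hj => hL j (by simp [hj]))

set_option maxRecDepth 8000 in
-- every table entry lies in [1, 81]
lemma pvTableB_bounds : ∀ x ∈ (pvTableB : List Int), 1 ≤ x ∧ x ≤ 81 := by decide

lemma pvAlt_false (n : Int) (h : n < 1 ∨ 81 < n) : is_in_mul_table_alt n = false := by
  unfold is_in_mul_table_alt
  rw [Bool.eq_false_iff]
  intro hc
  have hm := (PySem.Set.contains_iff (s := pvTableB) (x := n)).mp hc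
  have := pvTableB_bounds n hm
  omega

-- ===== VERDICT (by name: the statement is the Claim_ definition above) =====
set_option maxRecDepth 8000 in
theorem is_in_mul_table_spec : Claim_equal_is_in_mul_table := by
  intro n _
  unfold Spec_is_in_mul_table
  by_cases h : 1 ≤ n ∧ n ≤ 81
  · obtain ⟨h1, h2⟩ := h
    interval_cases n <;> decide
  · have h' : n < 1 ∨ 81 < n := by omega
    rw [pvAlt_false n h']
    unfold is_in_mul_table
    split
    · rfl
    · exact pvLoopA_false n _ (by decide) h'
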